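-- pv_equiv track=rewrite | github.com/core-challenge/2023solver-showcase | ddreconf/src/Main.py | reorder_vertices_mapping
-- ===== SOURCE A (Python) =====
-- def reorder_vertices_mapping(edges: list[tuple[int, int]]) -> tuple[dict[int, int], dict[int, int]]:
--     mapping = dict()
--     for a, b in edges:
--         if a not in mapping:
--             id_a = len(mapping) + 1
--             mapping[a] = id_a
--         if b not in mapping:
--             id_b = len(mapping) + 1
--             mapping[b] = id_b
--
--     inverse_mapping = dict()
--     for fr, to in mapping.items():
--         inverse_mapping[to] = fr
--     return mapping, inverse_mapping
-- ===== SOURCE B (Python) =====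
-- def reorder_vertices_mapping(edges: list[tuple[int, int]]) -> tuple[dict[int, int], dict[int, int]]:
--     # Sort-based ranking: record each vertex's FIRST occurrence index in the flattened
--     # edge stream (reverse iteration so earlier indices overwrite later ones), then the
--     # vertex order is the keys sorted by that index; ids are the 1-based ranks.
--     flat = [x for a, b in edges for x in (a, b)]
--     first = {v: i for i, v in reversed(list(enumerate(flat)))}
--     order = sorted(first, key=first.__getitem__)
--     mapping = {v: r + 1 for r, v in enumerate(order)}
--     inverse_mapping = {r + 1: v for r, v in enumerate(order)}
--     return mapping, inverse_mapping
-- ===== Notes on version B (the rewrite author's own statement) =====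
-- stated objective: alternative
-- what changed: Replaces A's incremental membership-guard insertion loop (assigning the next id on first sight) by a sort-based ranking: a reverse-enumeration overwrite builds each vertex's first-occurrence index, the vertices are sorted by that index, and both dicts are the 1-based ranks of that sorted order.
import Mathlib
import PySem

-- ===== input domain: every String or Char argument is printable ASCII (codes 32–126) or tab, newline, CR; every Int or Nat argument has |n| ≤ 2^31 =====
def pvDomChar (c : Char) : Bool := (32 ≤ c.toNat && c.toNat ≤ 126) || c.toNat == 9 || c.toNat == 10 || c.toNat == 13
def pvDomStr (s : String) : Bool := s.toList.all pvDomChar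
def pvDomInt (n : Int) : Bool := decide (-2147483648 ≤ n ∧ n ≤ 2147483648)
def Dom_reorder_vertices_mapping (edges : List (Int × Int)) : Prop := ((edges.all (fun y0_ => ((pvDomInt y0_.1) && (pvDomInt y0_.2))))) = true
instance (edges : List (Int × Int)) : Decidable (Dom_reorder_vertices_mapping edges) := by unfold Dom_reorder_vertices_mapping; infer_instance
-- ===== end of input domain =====

-- B replaces A's incremental membership-guard loop by a sort-based ranking (first-occurrence
-- index via reverse-enumeration overwrite, then sort by that index); same value, alternative algorithm.

-- ===== PORT A =====
-- literal transliteration of A: fold over edges, inserting each endpoint with id len+1 when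
-- absent, then a second fold over the items building the inverse dict.
def reorder_vertices_mapping (edges : List (Int × Int)) : (List (Int × Int)) × (List (Int × Int)) :=
  let mapping : PySem.Dict Int Int :=
    edges.foldl (fun m ab =>
      let m1 := if m.contains ab.1 then m else m.insert ab.1 ((m.size : Int) + 1)
      if m1.contains ab.2 then m1 else m1.insert ab.2 ((m1.size : Int) + 1))
      PySem.Dict.empty
  let inverse_mapping : PySem.Dict Int Int :=
    mapping.items.foldl (fun inv p => inv.insert p.2 p.1) PySem.Dict.empty
  (mapping.items, inverse_mapping.items)

-- ===== PORT B =====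
-- literal transliteration of B: flatten the edges; build `first` (vertex ↦ first-occurrence
-- index) by the dict comprehension over reversed(list(enumerate(flat))) (a foldl of inserts
-- over the reversed enumeration); order = sorted(first, key=first.__getitem__); then the two
-- rank comprehensions over enumerate(order).
def reorder_vertices_mapping_alt (edges : List (Int × Int)) : (List (Int × Int)) × (List (Int × Int)) :=
  let flat : List Int := edges.flatMap (fun ab => [ab.1, ab.2])
  let first : PySem.Dict Int Int :=
    ((PySem.List.enumerate flat).reverse).foldl (fun d iv => d.insert iv.2 iv.1) PySem.Dict.empty
  let order : List Int := PySem.List.sorted first.keys (fun v => first.getD v 0) false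
  let mapping : PySem.Dict Int Int :=
    PySem.Dict.ofList ((PySem.List.enumerate order).map (fun iv => (iv.2, iv.1 + 1)))
  let inverse_mapping : PySem.Dict Int Int :=
    PySem.Dict.ofList ((PySem.List.enumerate order).map (fun iv => (iv.1 + 1, iv.2)))
  (mapping.items, inverse_mapping.items)

-- ===== PRECONDITION & SPEC =====
def Spec_reorder_vertices_mapping (edges : List (Int × Int)) (out : (List (Int × Int)) × (List (Int × Int))) : Prop := out = reorder_vertices_mapping_alt edges
instance (edges : List (Int × Int)) (out : (List (Int × Int)) × (List (Int × Int))) : Decidable (Spec_reorder_vertices_mapping edges out) := by unfold Spec_reorder_vertices_mapping; infer_instance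

-- ===== CLAIM (what is proved, stated in full; the proofs are below) =====
def Claim_equal_reorder_vertices_mapping : Prop := ∀ (edges : List (Int × Int)), Dom_reorder_vertices_mapping edges → Spec_reorder_vertices_mapping edges (reorder_vertices_mapping edges)

-- ===== LEMMAS AND PROOFS =====

-- the numbered assoc list "first-occurrence order s with ids 1.."
def pvNum (s : List Int) : List (Int × Int) :=
  (PySem.List.enumerate s).map (fun iv => (iv.2, iv.1 + 1))

lemma pvNum_append_singleton (s : List Int) (v : Int) :
    pvNum (s ++ [v]) = pvNum s ++ [(v, (s.length : Int) + 1)] := by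
  simp [pvNum, PySem.List.enumerate_append, PySem.List.enumerate]

lemma keys_mk_pvNum (s : List Int) : (PySem.Dict.mk (pvNum s)).keys = s := by
  simp [PySem.Dict.keys, pvNum, List.map_map, Function.comp_def, PySem.List.map_snd_enumerate]

lemma length_pvNum (s : List Int) : (pvNum s).length = s.length := by
  simp [pvNum, PySem.List.length_enumerate]

-- one A-step equals Set.add on the order list
lemma stepA_pvNum (s : List Int) (v : Int) :
    (if (PySem.Dict.mk (pvNum s)).contains v then PySem.Dict.mk (pvNum s)
     else (PySem.Dict.mk (pvNum s)).insert v (((PySem.Dict.mk (pvNum s)).size : Int) + 1))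
    = PySem.Dict.mk (pvNum (PySem.Set.add s v)) := by
  by_cases hv : v ∈ s
  · have hc : (PySem.Dict.mk (pvNum s)).contains v = true := by
      rw [PySem.Dict.contains_eq_decide_mem_keys, keys_mk_pvNum]; simpa
    simp [hc, PySem.Set.add_of_mem hv]
  · have hc : (PySem.Dict.mk (pvNum s)).contains v = false := by
      rw [PySem.Dict.contains_eq_decide_mem_keys, keys_mk_pvNum]; simpa
    rw [PySem.Set.add_of_not_mem hv]
    apply PySem.Dict.ext
    simp only [hc, Bool.false_eq_true, if_false]
    rw [PySem.Dict.items_insert_of_not_contains _ _ hc]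
    have hs : ((PySem.Dict.mk (pvNum s)).size : Int) = (s.length : Int) := by
      simp [PySem.Dict.size, length_pvNum]
    rw [hs, pvNum_append_singleton]

-- the fold of A-steps over any vertex list is Set.update on the order list
lemma foldA_pvNum (xs : List Int) (s : List Int) :
    xs.foldl (fun m v => if m.contains v then m else m.insert v ((m.size : Int) + 1))
      (PySem.Dict.mk (pvNum s))
    = PySem.Dict.mk (pvNum (PySem.Set.update s xs)) := by
  induction xs generalizing s with
  | nil => simp [PySem.Set.update_nil]
  | cons x xs ih =>
    rw [PySem.Set.update_cons, List.foldl_cons, stepA_pvNum]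
    exact ih (PySem.Set.add s x)

-- A's edge loop is the vertex-list fold over the flattened edges
lemma foldA_edges (edges : List (Int × Int)) (m : PySem.Dict Int Int) :
    edges.foldl (fun m ab =>
      let m1 := if m.contains ab.1 then m else m.insert ab.1 ((m.size : Int) + 1)
      if m1.contains ab.2 then m1 else m1.insert ab.2 ((m1.size : Int) + 1)) m
    = (edges.flatMap (fun ab => [ab.1, ab.2])).foldl
        (fun m v => if m.contains v then m else m.insert v ((m.size : Int) + 1)) m := by
  induction edges generalizing m with
  | nil => rfl
  | cons e es ih => simp only [List.flatMap_cons, List.foldl_cons, List.foldl_append, ih]; rfl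

lemma nodup_ids (s : List Int) :
    (List.map (fun iv : Int × Int => iv.1 + 1) (PySem.List.enumerate s)).Nodup := by
  have h := PySem.List.pairwise_lt_enumerate s 0
  have h2 : (List.map (fun iv : Int × Int => iv.1 + 1) (PySem.List.enumerate s 0)).Pairwise (· < ·) :=
    (List.pairwise_map).2 (h.imp (by intro a b hab; omega))
  exact h2.imp ne_of_lt

-- Dict.ofList on a list with Nodup keys returns exactly that list
lemma items_ofList_of_nodup (l : List (Int × Int)) (h : (l.map Prod.fst).Nodup) :
    (PySem.Dict.ofList l).items = l := by
  have := PySem.Dict.items_foldl_insert_fresh l Prod.fst Prod.snd PySem.Dict.empty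
    (by intro a _; simp [PySem.Dict.contains_empty]) h
  simpa [PySem.Dict.ofList, PySem.Dict.update] using this

-- B's `first` dict: get? v = first occurrence index of v (offset by the enumeration start)
lemma getFirst (xs : List Int) (s : Int) (v : Int) :
    (((PySem.List.enumerate xs s).reverse).foldl
        (fun d iv => d.insert iv.2 iv.1) (PySem.Dict.empty : PySem.Dict Int Int)).get? v
    = (PySem.List.index? xs v).map (fun k => s + (k : Int)) := by
  induction xs generalizing s with
  | nil => simp [PySem.List.enumerate, PySem.List.index?_eq_idxOf?, PySem.Dict.get?_empty]
  | cons x xs ih =>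
    rw [PySem.List.enumerate_cons, List.reverse_cons, List.foldl_append]
    by_cases hv : v = x
    · subst hv
      rw [List.foldl_cons, List.foldl_nil, PySem.Dict.get?_insert_self,
        PySem.List.index?_cons_self]
      simp
    · rw [List.foldl_cons, List.foldl_nil,
        PySem.Dict.get?_insert_of_ne _ _ hv, ih (s + 1),
        PySem.List.index?_cons_of_ne _ (fun h => hv h.symm)]
      cases PySem.List.index? xs v with
      | none => simp
      | some k => simp; omega

-- dedup xs is strictly increasing under first-occurrence index
lemma dedup_pairwise_index (xs : List Int) :
    (PySem.List.dedup xs).Pairwise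
      (fun a b => (PySem.List.index? xs a).getD 0 < (PySem.List.index? xs b).getD 0) := by
  induction xs using List.reverseRecOn with
  | nil => simp [PySem.List.dedup]
  | append_singleton xs x ih =>
    have hkey : ∀ a ∈ xs,
        (PySem.List.index? (xs ++ [x]) a).getD 0 = (PySem.List.index? xs a).getD 0 := by
      intro a ha; rw [PySem.List.index?_append_of_mem _ ha]
    have hmemdedup : ∀ a ∈ PySem.List.dedup xs, a ∈ xs := by
      intro a ha; exact (PySem.List.mem_dedup xs a).1 ha
    by_cases hx : x ∈ xs
    · have hd : PySem.List.dedup (xs ++ [x]) = PySem.List.dedup xs := by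
        rw [PySem.List.dedup_eq_ofList, PySem.Set.ofList_append, PySem.Set.update_cons,
          PySem.Set.update_nil, PySem.Set.add_of_mem ((PySem.Set.mem_ofList xs x).2 hx),
          PySem.List.dedup_eq_ofList]
      rw [hd]
      refine ih.imp_of_mem ?_
      intro a b ha hb h
      rw [hkey a (hmemdedup a ha), hkey b (hmemdedup b hb)]; exact h
    · have hd : PySem.List.dedup (xs ++ [x]) = PySem.List.dedup xs ++ [x] := by
        rw [PySem.List.dedup_eq_ofList, PySem.Set.ofList_append, PySem.Set.update_cons,
          PySem.Set.update_nil, PySem.Set.add_of_not_mem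
            (fun h => hx ((PySem.Set.mem_ofList xs x).1 h)),
          PySem.List.dedup_eq_ofList]
      rw [hd, List.pairwise_append]
      refine ⟨ih.imp_of_mem ?_, by simp, ?_⟩
      · intro a b ha hb h
        rw [hkey a (hmemdedup a ha), hkey b (hmemdedup b hb)]; exact h
      · intro a ha b hb
        rw [List.mem_singleton] at hb; subst hb
        have hax : a ∈ xs := hmemdedup a ha
        rw [hkey a hax, PySem.List.index?_append_singleton_self xs b hx]
        obtain ⟨k, hk⟩ := Option.isSome_iff_exists.1 ((PySem.List.index?_isSome_iff xs a).2 hax)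
        obtain ⟨hklt, -, -⟩ := PySem.List.getElem_of_index?_eq_some hk
        rw [hk]; simpa using hklt

-- ===== VERDICT (by name: the statement is the Claim_ definition above) =====
theorem reorder_vertices_mapping_spec : Claim_equal_reorder_vertices_mapping := by
  intro edges _
  unfold Spec_reorder_vertices_mapping reorder_vertices_mapping reorder_vertices_mapping_alt
  simp only
  set flat := edges.flatMap (fun ab => [ab.1, ab.2]) with hflat
  set first := ((PySem.List.enumerate flat).reverse).foldl
      (fun d iv => d.insert iv.2 iv.1) (PySem.Dict.empty : PySem.Dict Int Int) with hfirst
  -- B's sorted order IS the ordered dedup of flat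
  have hget : ∀ v, first.get? v = (PySem.List.index? flat v).map (fun k => (0 : Int) + (k : Int)) :=
    fun v => getFirst flat 0 v
  have hkeys : first.keys = PySem.List.dedup flat.reverse := by
    rw [hfirst,
      PySem.Dict.keys_foldl_insert_key ((PySem.List.enumerate flat).reverse)
        (fun iv : Int × Int => iv.2) (fun d iv => iv.1) PySem.Dict.empty,
      PySem.Dict.keys_empty, PySem.Set.update_nil_left]
    simp [PySem.List.dedup_eq_ofList, List.map_reverse, PySem.List.map_snd_enumerate]
  have hperm : (PySem.List.dedup flat).Perm first.keys := by
    rw [hkeys]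
    refine (List.perm_ext_iff_of_nodup (PySem.List.nodup_dedup _)
      (PySem.List.nodup_dedup _)).2 ?_
    intro a; simp only [PySem.List.mem_dedup, List.mem_reverse]
  have hpw : (PySem.List.dedup flat).Pairwise
      (fun a b => first.getD a 0 < first.getD b 0) := by
    refine (dedup_pairwise_index flat).imp_of_mem ?_
    intro a b ha hb h
    have ha' : a ∈ flat := (PySem.List.mem_dedup flat a).1 ha
    have hb' : b ∈ flat := (PySem.List.mem_dedup flat b).1 hb
    rw [PySem.Dict.getD_eq_get?_getD, PySem.Dict.getD_eq_get?_getD, hget a, hget b]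
    obtain ⟨ka, hka⟩ := Option.isSome_iff_exists.1 ((PySem.List.index?_isSome_iff flat a).2 ha')
    obtain ⟨kb, hkb⟩ := Option.isSome_iff_exists.1 ((PySem.List.index?_isSome_iff flat b).2 hb')
    rw [hka, hkb] at h ⊢
    simp only [Option.getD_some] at h
    simpa using h
  have horder : PySem.List.sorted first.keys (fun v => first.getD v 0) false
      = PySem.List.dedup flat :=
    PySem.List.sorted_eq_of_perm_of_pairwise_lt _ _ _ hperm hpw
  rw [horder]
  set order := PySem.List.dedup flat with horder2
  have hnodup : order.Nodup := PySem.List.nodup_dedup flat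
  -- A's mapping items = pvNum order
  have hmapA : (edges.foldl (fun m ab =>
      let m1 := if m.contains ab.1 then m else m.insert ab.1 ((m.size : Int) + 1)
      if m1.contains ab.2 then m1 else m1.insert ab.2 ((m1.size : Int) + 1))
      PySem.Dict.empty).items = pvNum order := by
    rw [foldA_edges]
    have h0 : (PySem.Dict.empty : PySem.Dict Int Int) = PySem.Dict.mk (pvNum []) := rfl
    rw [h0, foldA_pvNum, PySem.Set.update_nil_left]
    rfl
  have hfstNum : (pvNum order).map Prod.fst = order := by
    simp [pvNum, List.map_map, Function.comp_def, PySem.List.map_snd_enumerate]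
  have hmapB : (PySem.Dict.ofList ((PySem.List.enumerate order).map
      (fun iv => (iv.2, iv.1 + 1)))).items = pvNum order :=
    items_ofList_of_nodup _ (by
      rw [show ((PySem.List.enumerate order).map (fun iv : Int × Int => (iv.2, iv.1 + 1)) : List (Int × Int)) = pvNum order from rfl, hfstNum]
      exact hnodup)
  have hsndNum : (pvNum order).map Prod.snd
      = (PySem.List.enumerate order).map (fun iv => iv.1 + 1) := by
    simp [pvNum, List.map_map, Function.comp_def]
  have hinvA : ((pvNum order).foldl (fun inv p => inv.insert p.2 p.1) PySem.Dict.empty).items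
      = (PySem.List.enumerate order).map (fun iv => (iv.1 + 1, iv.2)) := by
    have := PySem.Dict.items_foldl_insert_fresh (pvNum order) Prod.snd Prod.fst PySem.Dict.empty
      (by intro a _; simp [PySem.Dict.contains_empty])
      (by rw [hsndNum]; exact nodup_ids order)
    simpa [pvNum, List.map_map, Function.comp_def] using this
  have hinvB : (PySem.Dict.ofList ((PySem.List.enumerate order).map
      (fun iv => (iv.1 + 1, iv.2)))).items
      = (PySem.List.enumerate order).map (fun iv => (iv.1 + 1, iv.2)) :=
    items_ofList_of_nodup _ (by
      simpa [List.map_map, Function.comp_def] using nodup_ids order)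
  rw [hmapA, hmapB, hinvB, hinvA]
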